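-- pv_equiv track=rewrite | github.com/Lakshman-P4/Bannin.dev | bannin/intelligence/training.py | _extract_script_name
-- ===== SOURCE A (Python) =====
-- def _extract_script_name(cmdline: list) -> str:
--     """Extract a human-readable script name from the command line."""
--     for arg in cmdline:
--         arg_str = str(arg)
--         if arg_str.endswith(".py"):
--             basename = arg_str.rsplit("/", 1)[-1].rsplit("\\", 1)[-1]
--             return basename
--     # Fall back to module name for -m invocations
--     for i, arg in enumerate(cmdline):
--         if str(arg) == "-m" and i + 1 < len(cmdline):
--             return str(cmdline[i + 1])
--     return "unknown"
-- ===== SOURCE B (Python) =====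
-- def _extract_script_name(cmdline: list) -> str:
--     """Single pass: return the basename of the first '.py' argument,
--     falling back to the module named by the first '-m'."""
--     module = None
--     for i, arg in enumerate(cmdline):
--         s = str(arg)
--         if s.endswith(".py"):
--             return s[max(s.rfind("/"), s.rfind("\\")) + 1:]
--         if module is None and s == "-m" and i + 1 < len(cmdline):
--             module = str(cmdline[i + 1])
--     return module if module is not None else "unknown"
-- ===== Notes on version B (the rewrite author's own statement) =====
-- stated objective: simpler
-- what changed: A's two separate scans (one for a '.py' argument, then a second enumerate scan for '-m') are fused into one pass that remembers the first '-m' module as a fallback, and the double rsplit basename is replaced by slicing after the last path separator found with rfind.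
import Mathlib
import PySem

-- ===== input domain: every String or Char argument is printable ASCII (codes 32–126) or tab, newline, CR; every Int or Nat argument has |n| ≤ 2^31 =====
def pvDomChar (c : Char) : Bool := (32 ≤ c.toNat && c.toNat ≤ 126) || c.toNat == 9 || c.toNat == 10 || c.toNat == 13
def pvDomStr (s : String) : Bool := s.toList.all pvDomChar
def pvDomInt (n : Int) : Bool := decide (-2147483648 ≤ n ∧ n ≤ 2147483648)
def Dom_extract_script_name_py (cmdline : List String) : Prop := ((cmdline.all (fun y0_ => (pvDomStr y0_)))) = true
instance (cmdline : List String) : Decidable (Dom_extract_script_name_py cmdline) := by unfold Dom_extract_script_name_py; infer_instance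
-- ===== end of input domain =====

-- B fuses A's two scans into one pass that remembers the first '-m' module as a
-- fallback, and takes the basename by slicing after the last separator (objective: simpler).

-- ===== PORT A =====
-- rsplit(sep, 1)[-1] for a one-character separator: the suffix after the last
-- occurrence of sep (the whole string when sep is absent); exact for 1-char sep.
def pvRsplit1Last (c : Char) (s : String) : String :=
  String.ofList (s.toList.foldl (fun acc x => if x == c then [] else acc ++ [x]) [])

-- first loop of A: return the basename of the first argument ending in ".py"
def pvFirstPy : List String → Option String
  | [] => none
  | a :: rest =>
    if PySem.Str.endswith a ".py" then
      some (pvRsplit1Last '\\' (pvRsplit1Last '/' a))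
    else pvFirstPy rest

-- second loop of A: over enumerate(cmdline), return cmdline[i+1] after the first "-m"
def pvSecondLoop (cmdline : List String) : List (Int × String) → String
  | [] => "unknown"
  | (i, a) :: rest =>
    if a == "-m" && decide (i + 1 < (cmdline.length : Int)) then
      (PySem.List.pyGet? cmdline (i + 1)).getD ""   -- the guard puts the index in range
    else pvSecondLoop cmdline rest

def extract_script_name_py (cmdline : List String) : String :=
  match pvFirstPy cmdline with
  | some b => b
  | none => pvSecondLoop cmdline (PySem.List.enumerate cmdline)

-- ===== PORT B =====
-- Source B's basename: s[max(s.rfind("/"), s.rfind("\\")) + 1:]; the start index is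
-- ≥ 0 (rfind ≥ -1), so the slice is the clamped drop (exact here)
def pvBasenameB (s : String) : String :=
  String.ofList
    (PySem.List.slice s.toList
      (some (max (PySem.Str.rfind s "/") (PySem.Str.rfind s "\\") + 1)) none)

-- Source B's single loop over enumerate(cmdline), carrying `module`
def pvAltLoop (cmdline : List String) (module : Option String) : List (Int × String) → String
  | [] => match module with | some m => m | none => "unknown"
  | (i, s) :: rest =>
    if PySem.Str.endswith s ".py" then pvBasenameB s
    else pvAltLoop cmdline
      (if module.isNone && s == "-m" && decide (i + 1 < (cmdline.length : Int)) then
        some ((PySem.List.pyGet? cmdline (i + 1)).getD "")   -- the guard puts the index in range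
      else module) rest

def extract_script_name_py_alt (cmdline : List String) : String :=
  pvAltLoop cmdline none (PySem.List.enumerate cmdline)

-- ===== PRECONDITION & SPEC =====
def Spec_extract_script_name_py (cmdline : List String) (out : String) : Prop :=
  out = extract_script_name_py_alt cmdline
instance (cmdline : List String) (out : String) : Decidable (Spec_extract_script_name_py cmdline out) := by
  unfold Spec_extract_script_name_py; infer_instance

-- ===== CLAIM =====
def Claim_equal_extract_script_name_py : Prop :=
  ∀ (cmdline : List String), Dom_extract_script_name_py cmdline →
    Spec_extract_script_name_py cmdline (extract_script_name_py cmdline)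

-- ===== LEMMAS AND PROOFS =====

-- structural left recursion computing rfind for a one-character needle
def pvRfindAux (c : Char) : List Char → Int
  | [] => -1
  | x :: xs =>
    let r := pvRfindAux c xs
    if 0 ≤ r then r + 1 else if x = c then 0 else -1

theorem pvRfindAux_ge (c : Char) (cs : List Char) : -1 ≤ pvRfindAux c cs := by
  induction cs with
  | nil => simp [pvRfindAux]
  | cons x xs ih => simp only [pvRfindAux]; split_ifs <;> omega

-- [c].isPrefixOf l decides whether l starts with c
theorem pvIsPrefix_single (c : Char) (l : List Char) :
    List.isPrefixOf [c] l = (l.head? == some c) := by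
  cases l with
  | nil => rfl
  | cons x xs => simp [List.isPrefixOf, List.head?, eq_comm]

-- one unfolding step of PySem.Chars.rfind.go
theorem pvGo_succ (s : List Char) (c : Char) (j : Nat) :
    PySem.Chars.rfind.go s [c] (j + 1) =
      (if List.isPrefixOf [c] (List.drop (j + 1) s) then ((j + 1 : Nat) : Int)
       else PySem.Chars.rfind.go s [c] j) := rfl

theorem pvGo_zero (s : List Char) (c : Char) :
    PySem.Chars.rfind.go s [c] 0 = (if List.isPrefixOf [c] s then 0 else -1) := rfl

theorem pvGo_cons (c : Char) (x : Char) (xs : List Char) : ∀ (n : Nat),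
    PySem.Chars.rfind.go (x :: xs) [c] (n + 1) =
      (if 0 ≤ PySem.Chars.rfind.go xs [c] n then PySem.Chars.rfind.go xs [c] n + 1
       else if x = c then 0 else -1) := by
  intro n
  induction n with
  | zero =>
    rw [pvGo_succ, pvGo_zero, pvGo_zero]
    simp only [List.drop_succ_cons, List.drop_zero, pvIsPrefix_single]
    cases h : xs.head? == some c
    · by_cases hx : x = c <;> simp [hx]
    · simp
  | succ m ih =>
    rw [pvGo_succ, pvGo_succ xs c m]
    have hd : List.drop (m + 1 + 1) (x :: xs) = List.drop (m + 1) xs := by simp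
    rw [hd]
    cases h : List.isPrefixOf [c] (List.drop (m + 1) xs) with
    | true =>
      have hpos : (0 : Int) ≤ ((m + 1 : Nat) : Int) := by positivity
      simp only [if_true, if_pos hpos]
      push_cast
      ring
    | false => simpa [h] using ih

theorem pvRfind_eq_aux (c : Char) (cs : List Char) :
    PySem.Chars.rfind cs [c] = pvRfindAux c cs := by
  induction cs with
  | nil => rfl
  | cons x xs ih =>
    show PySem.Chars.rfind.go (x :: xs) [c] (xs.length + 1) = _
    rw [pvGo_cons]
    have : PySem.Chars.rfind.go xs [c] xs.length = pvRfindAux c xs := ih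
    simp only [this, pvRfindAux]

-- composing the two reset-folds of A's basename gives a single reset-fold
theorem pvFold_comp (cs : List Char) : ∀ (a : List Char),
    ((cs.foldl (fun acc x => if x == '/' then [] else acc ++ [x]) a).foldl
        (fun acc x => if x == '\\' then [] else acc ++ [x]) ([] : List Char))
      = cs.foldl (fun acc ch => if ch == '/' || ch == '\\' then [] else acc ++ [ch])
          (a.foldl (fun acc x => if x == '\\' then [] else acc ++ [x]) ([] : List Char)) := by
  induction cs with
  | nil => intro a; simp
  | cons x cs ih =>
    intro a
    simp only [List.foldl_cons]
    rw [ih]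
    congr 1
    by_cases hx : x = '/'
    · simp [hx]
    · by_cases hx2 : x = '\\' <;> simp [hx, hx2, List.foldl_append]

-- the single reset-fold drops everything up to (and including) the last separator
theorem pvFold_drop (cs : List Char) : ∀ (a : List Char),
    cs.foldl (fun acc ch => if ch == '/' || ch == '\\' then [] else acc ++ [ch]) a
      = (if 0 ≤ max (pvRfindAux '/' cs) (pvRfindAux '\\' cs) then
          cs.drop ((max (pvRfindAux '/' cs) (pvRfindAux '\\' cs) + 1).toNat)
        else a ++ cs) := by
  induction cs with
  | nil => intro a; simp [pvRfindAux]
  | cons x xs ih =>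
    intro a
    have h1 := pvRfindAux_ge '/' xs
    have h2 := pvRfindAux_ge '\\' xs
    simp only [List.foldl_cons, pvRfindAux]
    rw [ih]
    by_cases hm : 0 ≤ max (pvRfindAux '/' xs) (pvRfindAux '\\' xs)
    · -- a separator occurs in xs: both sides drop into xs
      have hx1 : max (if 0 ≤ pvRfindAux '/' xs then pvRfindAux '/' xs + 1 else if x = '/' then 0 else -1)
            (if 0 ≤ pvRfindAux '\\' xs then pvRfindAux '\\' xs + 1 else if x = '\\' then 0 else -1)
          = max (pvRfindAux '/' xs) (pvRfindAux '\\' xs) + 1 := by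
        split_ifs <;> simp_all <;> omega
      rw [if_pos hm, hx1, if_pos (by omega : (0 : Int) ≤ max (pvRfindAux '/' xs) (pvRfindAux '\\' xs) + 1)]
      have ht : (max (pvRfindAux '/' xs) (pvRfindAux '\\' xs) + 1 + 1).toNat
          = (max (pvRfindAux '/' xs) (pvRfindAux '\\' xs) + 1).toNat + 1 := by omega
      rw [ht, List.drop_succ_cons]
    · -- no separator occurs in xs
      have hm1 : pvRfindAux '/' xs = -1 := by omega
      have hm2 : pvRfindAux '\\' xs = -1 := by omega
      rw [if_neg hm]
      by_cases hx : x = '/' ∨ x = '\\'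
      · have hsep : (x == '/' || x == '\\') = true := by
          rcases hx with h | h <;> simp [h]
        have hx1 : max (if 0 ≤ pvRfindAux '/' xs then pvRfindAux '/' xs + 1 else if x = '/' then 0 else -1)
              (if 0 ≤ pvRfindAux '\\' xs then pvRfindAux '\\' xs + 1 else if x = '\\' then 0 else -1)
            = 0 := by
          rcases hx with h | h <;> simp [hm1, hm2, h]
        rw [hx1, if_pos (le_refl (0 : Int)), hsep]
        simp
      · push Not at hx
        have hsep : (x == '/' || x == '\\') = false := by simp [hx.1, hx.2]
        have hx1 : max (if 0 ≤ pvRfindAux '/' xs then pvRfindAux '/' xs + 1 else if x = '/' then 0 else -1)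
              (if 0 ≤ pvRfindAux '\\' xs then pvRfindAux '\\' xs + 1 else if x = '\\' then 0 else -1)
            = -1 := by simp [hm1, hm2, hx.1, hx.2]
        rw [hx1, if_neg (by omega : ¬ (0 : Int) ≤ -1), hsep]
        simp

-- A's double rsplit basename equals B's rfind-slice basename
theorem pvBasename_eq (s : String) :
    pvRsplit1Last '\\' (pvRsplit1Last '/' s) = pvBasenameB s := by
  unfold pvRsplit1Last pvBasenameB
  rw [String.toList_ofList, pvFold_comp]
  simp only [List.foldl_nil]
  rw [pvFold_drop]
  have h1 := pvRfindAux_ge '/' s.toList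
  have h2 := pvRfindAux_ge '\\' s.toList
  have e1 : PySem.Str.rfind s "/" = pvRfindAux '/' s.toList := by
    rw [PySem.Str.rfind_eq]
    have hc : ("/" : String).toList = ['/'] := rfl
    rw [hc]
    exact pvRfind_eq_aux '/' s.toList
  have e2 : PySem.Str.rfind s "\\" = pvRfindAux '\\' s.toList := by
    rw [PySem.Str.rfind_eq]
    have hc : ("\\" : String).toList = ['\\'] := rfl
    rw [hc]
    exact pvRfind_eq_aux '\\' s.toList
  rw [e1, e2]
  by_cases hm : 0 ≤ max (pvRfindAux '/' s.toList) (pvRfindAux '\\' s.toList)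
  · rw [if_pos hm]
    congr 1
    -- slice with a nonnegative start and no stop is a drop
    have hk : max (pvRfindAux '/' s.toList) (pvRfindAux '\\' s.toList) + 1
        = (((max (pvRfindAux '/' s.toList) (pvRfindAux '\\' s.toList) + 1).toNat : Nat) : Int) := by
      omega
    rw [hk, PySem.List.slice_from_natCast, Int.toNat_natCast]
  · have hmax : max (pvRfindAux '/' s.toList) (pvRfindAux '\\' s.toList) = -1 := by omega
    rw [if_neg hm, hmax]
    rw [show (-1 : Int) + 1 = ((0 : Nat) : Int) from rfl, PySem.List.slice_from_natCast]
    simp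

-- structural version of A's second loop
def pvSecondRec : List String → String
  | [] => "unknown"
  | [_] => "unknown"
  | s :: nxt :: rest => if s == "-m" then nxt else pvSecondRec (nxt :: rest)

-- A's enumerate-and-index loop on a suffix equals the structural recursion
theorem pvSecondLoop_eq (suf : List String) : ∀ (k : Nat) (l : List String),
    l.drop k = suf →
    pvSecondLoop l (PySem.List.enumerate suf (k : Int)) = pvSecondRec suf := by
  induction suf with
  | nil => intro k l _; simp [PySem.List.enumerate, pvSecondLoop, pvSecondRec]
  | cons a rest ih =>
    intro k l hdrop
    have hk : k < l.length := by
      by_contra h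
      push Not at h
      rw [List.drop_eq_nil_of_le h] at hdrop
      exact List.cons_ne_nil a rest hdrop.symm
    have hlen : l.length = k + 1 + rest.length := by
      have := congrArg List.length hdrop
      rw [List.length_drop, List.length_cons] at this
      omega
    have hdrop' : l.drop (k + 1) = rest := by
      rw [← List.drop_drop, hdrop]; rfl
    simp only [PySem.List.enumerate, pvSecondLoop]
    by_cases hm : a = "-m"
    · cases rest with
      | nil =>
        have hguard : ¬ ((k : Int) + 1 < (l.length : Int)) := by
          rw [hlen]; push_cast [List.length_nil]; omega
        simp [hm, hguard, PySem.List.enumerate, pvSecondLoop, pvSecondRec]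
      | cons nxt r =>
        have hguard : (k : Int) + 1 < (l.length : Int) := by
          rw [hlen]; push_cast [List.length_cons]; omega
        have hget : PySem.List.pyGet? l ((k : Int) + 1) = some nxt := by
          have : ((k : Int) + 1) = ((k + 1 : Nat) : Int) := by push_cast; ring
          rw [this, PySem.List.pyGet?_natCast]
          rw [show l[k+1]? = (l.drop (k+1))[0]? by simp [List.getElem?_drop]]
          rw [hdrop']
          rfl
        simp [hm, hguard, hget, pvSecondRec]
    · have hrec : pvSecondLoop l (PySem.List.enumerate rest ((k : Int) + 1)) = pvSecondRec rest := by
        have : ((k : Int) + 1) = ((k + 1 : Nat) : Int) := by push_cast; ring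
        rw [this]
        exact ih (k + 1) l hdrop'
      have hrhs : pvSecondRec (a :: rest) = pvSecondRec rest := by
        cases rest with
        | nil => simp [pvSecondRec]
        | cons nxt r => simp [pvSecondRec, hm]
      simp [hm, hrec, hrhs]

-- B's fused loop against A's two loops, for any carried module
theorem pvAltLoop_eq (suf : List String) : ∀ (k : Nat) (l : List String) (module : Option String),
    l.drop k = suf →
    pvAltLoop l module (PySem.List.enumerate suf (k : Int)) =
      (match pvFirstPy suf with
       | some b => b
       | none => match module with | some m => m | none => pvSecondRec suf) := by
  induction suf with
  | nil =>
    intro k l module _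
    cases module <;> simp [PySem.List.enumerate, pvAltLoop, pvFirstPy, pvSecondRec]
  | cons s rest ih =>
    intro k l module hdrop
    have hk : k < l.length := by
      by_contra h
      push Not at h
      rw [List.drop_eq_nil_of_le h] at hdrop
      exact List.cons_ne_nil s rest hdrop.symm
    have hlen : l.length = k + 1 + rest.length := by
      have := congrArg List.length hdrop
      rw [List.length_drop, List.length_cons] at this
      omega
    have hdrop' : l.drop (k + 1) = rest := by
      rw [← List.drop_drop, hdrop]; rfl
    have hk1 : ((k : Int) + 1) = ((k + 1 : Nat) : Int) := by push_cast; ring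
    simp only [PySem.List.enumerate, pvAltLoop, pvFirstPy]
    by_cases hpy : PySem.Str.endswith s ".py" = true
    · simp only [hpy, if_true]
      exact (pvBasename_eq s).symm
    · simp only [hpy, Bool.false_eq_true, if_false]
      have hrec := fun m => ih (k + 1) l m hdrop'
      rw [hk1, hrec]
      cases hfp : pvFirstPy rest with
      | some b => simp
      | none =>
        cases module with
        | some m => simp
        | none =>
          simp only [Option.isNone_none, Bool.true_and]
          by_cases hm : s = "-m"
          · cases rest with
            | nil =>
              have hguard : ¬ ((k : Int) + 1 < (l.length : Int)) := by
                rw [hlen]; push_cast [List.length_nil]; omega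
              simp [hm, hguard, pvSecondRec]
            | cons nxt r =>
              have hguard : (k : Int) + 1 < (l.length : Int) := by
                rw [hlen]; push_cast [List.length_cons]; omega
              have hget : PySem.List.pyGet? l ((k : Int) + 1) = some nxt := by
                rw [hk1, PySem.List.pyGet?_natCast]
                rw [show l[k+1]? = (l.drop (k+1))[0]? by simp [List.getElem?_drop]]
                rw [hdrop']
                rfl
              simp [hm, hguard, hget, pvSecondRec]
          · have hrhs : pvSecondRec (s :: rest) = pvSecondRec rest := by
              cases rest with
              | nil => simp [pvSecondRec]
              | cons nxt r => simp [pvSecondRec, hm]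
            simp [hm, hrhs]

-- ===== VERDICT =====
theorem extract_script_name_py_spec : Claim_equal_extract_script_name_py := by
  unfold Claim_equal_extract_script_name_py
  intro cmdline _
  unfold Spec_extract_script_name_py extract_script_name_py extract_script_name_py_alt
  have hB : pvAltLoop cmdline none (PySem.List.enumerate cmdline ((0 : Nat) : Int)) =
      (match pvFirstPy cmdline with
       | some b => b
       | none => match (none : Option String) with | some m => m | none => pvSecondRec cmdline) :=
    pvAltLoop_eq cmdline 0 cmdline none (by simp)
  cases hfp : pvFirstPy cmdline with
  | some b => simpa [hfp] using hB.symm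
  | none =>
    have hA : pvSecondLoop cmdline (PySem.List.enumerate cmdline ((0 : Nat) : Int)) = pvSecondRec cmdline :=
      pvSecondLoop_eq cmdline 0 cmdline (by simp)
    simp only [hfp] at hB ⊢
    simpa using hA.trans (by simpa [hfp] using hB.symm)
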